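-- pv_equiv track=rewrite | github.com/LuigiSigillo/LatentWaveletDiffusion | src/vae_SE_finetuning/ae-spectra.py | zigzag_indices
-- ===== SOURCE A (Python) =====
-- def zigzag_indices(n: int):
--     """
--     Returns a list of (row, col) indices following the *standard JPEG* zigzag:
--       - Even diagonals (sum = 0,2,4,...) go bottom-up
--       - Odd diagonals (sum = 1,3,5,...) go top-down
--     """
--     indices = []
--     for s in range(2 * n - 1):
--         if s % 2 == 0:
--             # even sum => bottom-up
--             for i in range(s, -1, -1):
--                 j = s - i
--                 if 0 <= i < n and 0 <= j < n:
--                     indices.append((i, j))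
--         else:
--             # odd sum => top-down
--             for i in range(s + 1):
--                 j = s - i
--                 if 0 <= i < n and 0 <= j < n:
--                     indices.append((i, j))
--     return indices
-- ===== SOURCE B (Python) =====
-- def zigzag_indices(n: int):
--     pairs = [(i, j) for i in range(n) for j in range(n)]
--     m = 2 * n + 1
--     return sorted(pairs, key=lambda p: (p[0] + p[1]) * m + (p[0] if (p[0] + p[1]) % 2 else -p[0]))
-- ===== Notes on version B (the rewrite author's own statement) =====
-- stated objective: simpler
-- what changed: Replaces A's manual alternating diagonal walk (outer loop over diagonal sums with direction-switching inner loops and bounds filtering) by enumerating all (i,j) pairs once and sorting them by a single integer key encoding (i+j, i if (i+j) odd else -i).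
import Mathlib
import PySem

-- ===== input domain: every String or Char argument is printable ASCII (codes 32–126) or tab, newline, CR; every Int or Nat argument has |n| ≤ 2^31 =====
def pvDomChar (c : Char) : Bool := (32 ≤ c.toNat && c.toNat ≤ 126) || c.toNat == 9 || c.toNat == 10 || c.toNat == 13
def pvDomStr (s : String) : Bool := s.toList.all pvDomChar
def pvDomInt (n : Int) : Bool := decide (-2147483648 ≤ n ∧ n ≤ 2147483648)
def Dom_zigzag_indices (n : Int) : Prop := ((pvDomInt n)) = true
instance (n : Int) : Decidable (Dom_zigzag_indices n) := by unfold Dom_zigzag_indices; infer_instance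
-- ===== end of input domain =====

-- B replaces A's manual alternating diagonal walk by enumerating all (i, j) pairs and sorting
-- them once by one integer key encoding (i + j, i if (i + j) odd else -i): simpler, same O(n^2) data scale.

-- ===== PORT A =====
def zigzag_indices (n : Int) : List (Int × Int) :=
  (PySem.List.pyRange 0 (2 * n - 1) 1).foldl (fun indices s =>
    if PySem.Int.mod s 2 = 0 then
      -- even sum => bottom-up
      (PySem.List.pyRange s (-1) (-1)).foldl (fun acc i =>
        let j := s - i
        if 0 ≤ i ∧ i < n ∧ 0 ≤ j ∧ j < n then acc ++ [(i, j)] else acc) indices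
    else
      -- odd sum => top-down
      (PySem.List.pyRange 0 (s + 1) 1).foldl (fun acc i =>
        let j := s - i
        if 0 ≤ i ∧ i < n ∧ 0 ≤ j ∧ j < n then acc ++ [(i, j)] else acc) indices) []

-- ===== PORT B =====
def zigzag_indices_alt (n : Int) : List (Int × Int) :=
  let pairs := (PySem.List.pyRange 0 n 1).flatMap (fun i =>
    (PySem.List.pyRange 0 n 1).map (fun j => (i, j)))
  let m := 2 * n + 1
  PySem.List.sorted pairs (fun p =>
    (p.1 + p.2) * m + (if PySem.Int.mod (p.1 + p.2) 2 ≠ 0 then p.1 else -p.1))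

-- ===== PRECONDITION & SPEC =====
def Spec_zigzag_indices (n : Int) (out : List (Int × Int)) : Prop := out = zigzag_indices_alt n
instance (n : Int) (out : List (Int × Int)) : Decidable (Spec_zigzag_indices n out) := by unfold Spec_zigzag_indices; infer_instance

-- ===== CLAIM (what is proved, stated in full; the proofs are below) =====
def Claim_equal_zigzag_indices : Prop := ∀ (n : Int), Dom_zigzag_indices n → Spec_zigzag_indices n (zigzag_indices n)

-- ===== LEMMAS AND PROOFS =====

def diagA (n s : Int) : List (Int × Int) :=
  ((if PySem.Int.mod s 2 = 0 then PySem.List.pyRange s (-1) (-1)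
    else PySem.List.pyRange 0 (s + 1) 1).filter
      (fun i => decide (0 ≤ i ∧ i < n ∧ 0 ≤ s - i ∧ s - i < n))).map (fun i => (i, s - i))
theorem inner_foldl_eq (n s : Int) (rng : List Int) (acc : List (Int × Int)) :
    rng.foldl (fun acc2 i =>
      let j := s - i
      if 0 ≤ i ∧ i < n ∧ 0 ≤ j ∧ j < n then acc2 ++ [(i, j)] else acc2) acc
    = acc ++ ((rng.filter (fun i => decide (0 ≤ i ∧ i < n ∧ 0 ≤ s - i ∧ s - i < n))).map
        (fun i => (i, s - i))) := by
  have h := PySem.List.foldl_append_if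
    (fun i => decide (0 ≤ i ∧ i < n ∧ 0 ≤ s - i ∧ s - i < n)) (fun i => (i, s - i)) rng acc
  simpa using h
theorem A_eq_flatMap (n : Int) :
    zigzag_indices n = (PySem.List.pyRange 0 (2 * n - 1) 1).flatMap (diagA n) := by
  unfold zigzag_indices
  rw [show (fun (indices : List (Int × Int)) (s : Int) =>
      if PySem.Int.mod s 2 = 0 then
        (PySem.List.pyRange s (-1) (-1)).foldl (fun acc i =>
          let j := s - i
          if 0 ≤ i ∧ i < n ∧ 0 ≤ j ∧ j < n then acc ++ [(i, j)] else acc) indices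
      else
        (PySem.List.pyRange 0 (s + 1) 1).foldl (fun acc i =>
          let j := s - i
          if 0 ≤ i ∧ i < n ∧ 0 ≤ j ∧ j < n then acc ++ [(i, j)] else acc) indices)
      = fun indices s => indices ++ diagA n s from
    funext fun indices => funext fun s => by
      by_cases h : PySem.Int.mod s 2 = 0
      · rw [if_pos h, inner_foldl_eq]; simp only [diagA, if_pos h]
      · rw [if_neg h, inner_foldl_eq]; simp only [diagA, if_neg h]]
  simpa using PySem.List.foldl_append_eq_flatMap (diagA n) (PySem.List.pyRange 0 (2 * n - 1) 1) []
theorem mem_diagA (n s : Int) (p : Int × Int) :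
    p ∈ diagA n s ↔ (0 ≤ p.1 ∧ p.1 < n ∧ 0 ≤ p.2 ∧ p.2 < n ∧ p.1 + p.2 = s) := by
  obtain ⟨x, y⟩ := p
  unfold diagA
  by_cases h : PySem.Int.mod s 2 = 0
  · simp only [if_pos h, List.mem_map, List.mem_filter,
      PySem.List.mem_pyRange_neg_one, decide_eq_true_eq, Prod.mk.injEq]
    constructor
    · rintro ⟨i, ⟨hr, hb⟩, rfl, rfl⟩; omega
    · rintro ⟨h1, h2, h3, h4, h5⟩; exact ⟨x, ⟨⟨by omega, by omega⟩, rfl, by omega⟩⟩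
  · simp only [if_neg h, List.mem_map, List.mem_filter,
      PySem.List.mem_pyRange_one, decide_eq_true_eq, Prod.mk.injEq]
    constructor
    · rintro ⟨i, ⟨hr, hb⟩, rfl, rfl⟩; omega
    · rintro ⟨h1, h2, h3, h4, h5⟩; exact ⟨x, ⟨⟨by omega, by omega⟩, rfl, by omega⟩⟩

def pvKey (n : Int) (p : Int × Int) : Int :=
  (p.1 + p.2) * (2 * n + 1) + (if PySem.Int.mod (p.1 + p.2) 2 ≠ 0 then p.1 else -p.1)

theorem key_lt_of_same_sum (n s a b : Int)
    (h2 : if PySem.Int.mod s 2 = 0 then b < a else a < b) :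
    pvKey n (a, s - a) < pvKey n (b, s - b) := by
  unfold pvKey
  have ea : a + (s - a) = s := by ring
  have eb : b + (s - b) = s := by ring
  simp only [ea, eb]
  rw [PySem.Int.mod_eq_emod_of_pos (by norm_num : (0:Int) < 2)] at h2
  by_cases h : s % 2 = 0
  · rw [if_pos h] at h2
    simp [h]; omega
  · rw [if_neg h] at h2
    have h1 : s % 2 = 1 := by omega
    simp [h1]; omega

theorem key_lt_of_lt_sum (n : Int) (a b : Int × Int)
    (ha : 0 ≤ a.1 ∧ a.1 < n) (hb : 0 ≤ b.1 ∧ b.1 < n)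
    (hs : a.1 + a.2 < b.1 + b.2) :
    pvKey n a < pvKey n b := by
  unfold pvKey
  have hm : (1 : Int) * (2 * n + 1) ≤ (b.1 + b.2 - (a.1 + a.2)) * (2 * n + 1) := by
    apply mul_le_mul_of_nonneg_right <;> omega
  have hsa : (if PySem.Int.mod (a.1 + a.2) 2 ≠ 0 then a.1 else -a.1) < n ∧
      -n < (if PySem.Int.mod (a.1 + a.2) 2 ≠ 0 then a.1 else -a.1) := by
    split <;> omega
  have hsb : (if PySem.Int.mod (b.1 + b.2) 2 ≠ 0 then b.1 else -b.1) < n ∧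
      -n < (if PySem.Int.mod (b.1 + b.2) 2 ≠ 0 then b.1 else -b.1) := by
    split <;> omega
  nlinarith [hm, hsa.1, hsa.2, hsb.1, hsb.2]

theorem pairwise_key_diagA (n s : Int) :
    (diagA n s).Pairwise (fun a b => pvKey n a < pvKey n b) := by
  unfold diagA
  rw [List.pairwise_map]
  by_cases h : PySem.Int.mod s 2 = 0
  · rw [if_pos h]
    have base : (PySem.List.pyRange s (-1) (-1)).Pairwise (fun a b => b < a) := by
      rw [PySem.List.pyRange_neg_one_eq_reverse, List.pairwise_reverse]
      exact PySem.List.pairwise_lt_pyRange_one _ _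
    exact (base.filter _).imp fun {a b} hba => key_lt_of_same_sum n s a b (by rw [if_pos h]; exact hba)
  · rw [if_neg h]
    have base : (PySem.List.pyRange 0 (s + 1) 1).Pairwise (fun a b => a < b) :=
      PySem.List.pairwise_lt_pyRange_one _ _
    exact (base.filter _).imp fun {a b} hab => key_lt_of_same_sum n s a b (by rw [if_neg h]; exact hab)

theorem pairwise_key_A (n : Int) :
    (zigzag_indices n).Pairwise (fun a b => pvKey n a < pvKey n b) := by
  rw [A_eq_flatMap, List.pairwise_flatMap]
  refine ⟨fun s _ => pairwise_key_diagA n s, ?_⟩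
  refine (PySem.List.pairwise_lt_pyRange_one 0 (2 * n - 1)).imp ?_
  intro s s' hss x hx y hy
  have hxs := (mem_diagA n s x).1 hx
  have hys := (mem_diagA n s' y).1 hy
  exact key_lt_of_lt_sum n x y ⟨hxs.1, hxs.2.1⟩ ⟨hys.1, hys.2.1⟩ (by omega)

theorem mem_A (n : Int) (p : Int × Int) :
    p ∈ zigzag_indices n ↔ (0 ≤ p.1 ∧ p.1 < n ∧ 0 ≤ p.2 ∧ p.2 < n) := by
  rw [A_eq_flatMap]
  simp only [List.mem_flatMap, PySem.List.mem_pyRange_one, mem_diagA]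
  constructor
  · rintro ⟨s, _, h1, h2, h3, h4, _⟩; exact ⟨h1, h2, h3, h4⟩
  · rintro ⟨h1, h2, h3, h4⟩; exact ⟨p.1 + p.2, ⟨by omega, by omega⟩, h1, h2, h3, h4, rfl⟩

theorem mem_pairs (n : Int) (p : Int × Int) :
    p ∈ (PySem.List.pyRange 0 n 1).flatMap (fun i => (PySem.List.pyRange 0 n 1).map (fun j => (i, j)))
      ↔ (0 ≤ p.1 ∧ p.1 < n ∧ 0 ≤ p.2 ∧ p.2 < n) := by
  obtain ⟨x, y⟩ := p
  simp only [List.mem_flatMap, List.mem_map, PySem.List.mem_pyRange_one, Prod.mk.injEq]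
  constructor
  · rintro ⟨i, hi, j, hj, rfl, rfl⟩; exact ⟨hi.1, hi.2, hj.1, hj.2⟩
  · rintro ⟨h1, h2, h3, h4⟩; exact ⟨x, ⟨h1, h2⟩, y, ⟨h3, h4⟩, rfl, rfl⟩

theorem pairwise_lex_pairs (n : Int) :
    ((PySem.List.pyRange 0 n 1).flatMap (fun i => (PySem.List.pyRange 0 n 1).map (fun j => (i, j)))).Pairwise
      (fun a b => toLex a < toLex b) := by
  rw [List.pairwise_flatMap]
  constructor
  · intro i _
    rw [List.pairwise_map]
    refine (PySem.List.pairwise_lt_pyRange_one 0 n).imp ?_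
    intro a b hab
    rw [Prod.Lex.lt_iff]; right; exact ⟨rfl, hab⟩
  · refine (PySem.List.pairwise_lt_pyRange_one 0 n).imp ?_
    intro i i' hii x hx y hy
    simp only [List.mem_map] at hx hy
    obtain ⟨j, _, rfl⟩ := hx
    obtain ⟨j', _, rfl⟩ := hy
    rw [Prod.Lex.lt_iff]; left; exact hii

theorem perm_A_pairs (n : Int) :
    (zigzag_indices n).Perm
      ((PySem.List.pyRange 0 n 1).flatMap (fun i => (PySem.List.pyRange 0 n 1).map (fun j => (i, j)))) := by
  have nodupA : (zigzag_indices n).Nodup :=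
    (pairwise_key_A n).imp fun {a b} h => by rintro rfl; exact lt_irrefl _ h
  have nodupP : ((PySem.List.pyRange 0 n 1).flatMap (fun i => (PySem.List.pyRange 0 n 1).map (fun j => (i, j)))).Nodup :=
    (pairwise_lex_pairs n).imp fun {a b} h => by rintro rfl; exact lt_irrefl _ h
  rw [List.perm_ext_iff_of_nodup nodupA nodupP]
  intro p
  rw [mem_A, mem_pairs]

-- ===== VERDICT (by name: the statement is the Claim_ definition above) =====
theorem zigzag_indices_spec : Claim_equal_zigzag_indices := by
  intro n _
  unfold Spec_zigzag_indices zigzag_indices_alt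
  exact (PySem.List.sorted_eq_of_perm_of_pairwise_lt _ _ (pvKey n) (perm_A_pairs n)
    (pairwise_key_A n)).symm
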